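-- pv_equiv track=rewrite | github.com/Yoo-SeungHyeon/Algorithm | Python/SWEA/Unrated/5656. ［모의 SW 역량테스트］ 벽돌 깨기/［모의 SW 역량테스트］ 벽돌 깨기.py | search_start
-- ===== SOURCE A (Python) =====
-- def search_start(blocks):
--     start_result = []
--     for col_idx, col in enumerate(zip(*blocks)):
--         found = False
--         for row_idx, val in enumerate(col):
--             if val != 0:
--                 start_result.append((row_idx, col_idx))
--                 found = True
--                 break
--         if not found:
--             start_result.append((None, col_idx))
--     return start_result
-- ===== SOURCE B (Python) =====
-- def search_start(blocks):
--     cols = min((len(r) for r in blocks), default=0)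
--     result = [(None, c) for c in range(cols)]
--     for row_idx, row in enumerate(blocks):
--         result = [(row_idx, c) if first is None and row[c] != 0 else (first, c)
--                   for (first, c) in result]
--     return result
-- ===== Notes on version B (the rewrite author's own statement) =====
-- stated objective: alternative
-- what changed: Replaces the transpose (zip(*blocks)) plus per-column inner scan by a single row-major pass that keeps per-column first-found state in the result list itself.
import Mathlib
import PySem

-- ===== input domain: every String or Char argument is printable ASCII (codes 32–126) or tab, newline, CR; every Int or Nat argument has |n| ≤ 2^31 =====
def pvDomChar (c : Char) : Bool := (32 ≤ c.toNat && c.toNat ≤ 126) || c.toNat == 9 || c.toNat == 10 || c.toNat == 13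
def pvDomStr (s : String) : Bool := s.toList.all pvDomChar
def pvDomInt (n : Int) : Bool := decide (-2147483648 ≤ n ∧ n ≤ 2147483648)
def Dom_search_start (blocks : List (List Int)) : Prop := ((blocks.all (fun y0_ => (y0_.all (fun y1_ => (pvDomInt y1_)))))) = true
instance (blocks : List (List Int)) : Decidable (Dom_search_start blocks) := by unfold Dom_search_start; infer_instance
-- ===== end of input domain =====

-- B replaces A's transpose-then-scan-each-column by a single row-major pass keeping
-- per-column first-found state in the result list itself (same cost, different structure).


-- shared helper for the builtin truncation length of zip(*blocks) / min of row lengths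
-- (both Pythons compute exactly this number: 0 for no rows, else the minimum row length)
def pyMinLen (bs : List (List Int)) : Nat := ((bs.map List.length).min?).getD 0

-- ===== PORT A =====
-- zip(*blocks): column c (for c < min row length) is [row[c] for row in blocks];
-- getD c 0 is exact here since c < length of every row
def zipStar (bs : List (List Int)) : List (List Int) :=
  (List.range (pyMinLen bs)).map (fun c => bs.map (fun r => r.getD c 0))

-- inner loop of A: first row index (starting at r) whose value is nonzero
def findRow (r : Int) : List Int → Option Int
  | [] => none
  | v :: vs => if v ≠ 0 then some r else findRow (r + 1) vs

-- outer loop of A over enumerate(zip(*blocks)), building start_result in order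
def aLoop : List (List Int) → Int → List (Option Int × Int)
  | [], _ => []
  | col :: rest, k =>
    (match findRow 0 col with
     | some r => ((some r : Option Int), k)
     | none => ((none : Option Int), k)) :: aLoop rest (k + 1)

def search_start (blocks : List (List Int)) : List (Option Int × Int) :=
  aLoop (zipStar blocks) 0

-- ===== PORT B =====
-- one row of B's pass: the per-row list comprehension over the current result
-- (row[c] with 0 ≤ c < min row length, so getD c.toNat 0 is exact)
def bRow (r : Int) (row : List Int) (res : List (Option Int × Int)) : List (Option Int × Int) :=
  res.map (fun p =>
    match p with
    | (none, c) => if row.getD c.toNat 0 ≠ 0 then ((some r : Option Int), c) else ((none : Option Int), c)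
    | (some f, c) => ((some f : Option Int), c))

-- B's outer loop over enumerate(blocks)
def bFold : List (List Int) → Int → List (Option Int × Int) → List (Option Int × Int)
  | [], _, res => res
  | row :: rest, r, res => bFold rest (r + 1) (bRow r row res)

def search_start_alt (blocks : List (List Int)) : List (Option Int × Int) :=
  let cols := pyMinLen blocks
  bFold blocks 0 ((List.range cols).map (fun (c : Nat) => ((none : Option Int), (c : Int))))

-- ===== PRECONDITION & SPEC =====
def Spec_search_start (blocks : List (List Int)) (out : List (Option Int × Int)) : Prop := out = search_start_alt blocks
instance (blocks : List (List Int)) (out : List (Option Int × Int)) : Decidable (Spec_search_start blocks out) := by unfold Spec_search_start; infer_instance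

-- ===== CLAIM (what is proved, stated in full; the proofs are below) =====
def Claim_equal_search_start : Prop := ∀ (blocks : List (List Int)), Dom_search_start blocks → Spec_search_start blocks (search_start blocks)

-- ===== LEMMAS AND PROOFS =====

-- A's per-column head entry is (findRow 0 col, k)
theorem aLoop_cons (col : List Int) (rest : List (List Int)) (k : Int) :
    aLoop (col :: rest) k = (findRow 0 col, k) :: aLoop rest (k + 1) := by
  cases h : findRow 0 col <;> simp [aLoop, h]

-- A's loop over a mapped range', with the running index matching the range
theorem aLoop_range' (g : Nat → List Int) :
    ∀ (n a : Nat), aLoop ((List.range' a n).map g) (a : Int)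
      = (List.range' a n).map (fun c => (findRow 0 (g c), (c : Int))) := by
  intro n
  induction n with
  | zero => intro a; simp [aLoop]
  | succ n ih =>
    intro a
    have : ((a : Int) + 1) = ((a + 1 : Nat) : Int) := by push_cast; ring
    simp only [List.range'_succ, List.map_cons, aLoop_cons]
    rw [this, ih (a + 1)]

-- B's row step on a canonical state
theorem bRow_mk (r : Int) (row : List Int) (n : Nat) (fnd : Nat → Option Int) :
    bRow r row ((List.range n).map (fun c => (fnd c, (c : Int))))
      = (List.range n).map (fun c =>
          ((match fnd c with
            | none => if row.getD c 0 ≠ 0 then some r else none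
            | some f => some f), (c : Int))) := by
  simp only [bRow, List.map_map]
  apply List.map_congr_left
  intro c _
  cases h : fnd c <;> simp [h, Function.comp]
  split <;> rfl

-- B's whole pass computes, per column, the first nonzero row index
theorem bFold_mk (n : Nat) :
    ∀ (rows : List (List Int)) (r : Int) (fnd : Nat → Option Int),
      bFold rows r ((List.range n).map (fun c => (fnd c, (c : Int))))
        = (List.range n).map (fun c =>
            ((fnd c).or (findRow r (rows.map (fun row => row.getD c 0))), (c : Int))) := by
  intro rows
  induction rows with
  | nil => intro r fnd; simp [bFold, findRow]
  | cons row rest ih =>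
    intro r fnd
    rw [bFold, bRow_mk, ih]
    apply List.map_congr_left
    intro c _
    cases h : fnd c with
    | some f => simp [findRow]
    | none =>
      simp only [Option.none_or]
      by_cases hv : row[c]?.getD 0 = 0 <;> simp [findRow, List.getD, hv]

-- ===== VERDICT (by name: the statement is the Claim_ definition above) =====
theorem search_start_spec : Claim_equal_search_start := by
  intro blocks _
  show search_start blocks = search_start_alt blocks
  have hA := aLoop_range' (fun c => blocks.map (fun r => r.getD c 0)) (pyMinLen blocks) 0
  have hB := bFold_mk (pyMinLen blocks) blocks 0 (fun _ => none)
  simp only [Option.none_or] at hB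
  simp only [Nat.cast_zero] at hA
  simp only [search_start, zipStar, List.range_eq_range']
  rw [hA, ← List.range_eq_range']
  simp only [search_start_alt]
  rw [hB]
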